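-- pv_equiv track=rewrite | github.com/ncica89/Dashboard | dashboard-HV/dashboard/helpers.py | find_source_for_stora
-- ===== SOURCE A (Python) =====
-- def find_source_for_stora(data, stora):
--     result = None
--     try:
--         stora = stora.split(':')[1]
--     except:
--         pass
--     for item in data:
--         for key, value in item.items():
--             if key == stora:
--                 result =  value
--     return result
-- ===== SOURCE B (Python) =====
-- def find_source_for_stora(data, stora):
--     try:
--         stora = stora.split(':')[1]
--     except:
--         pass
--     for item in reversed(list(data)):
--         if stora in item:
--             return item[stora]
--     return None
-- ===== Notes on version B (the rewrite author's own statement) =====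
-- stated objective: simpler
-- what changed: B replaces A's forward full scan over every (key, value) pair with last-overwrite accumulation by a reverse scan over the dicts that returns on the first dict containing the key (dict keys are unique, so the first hit from the end is A's last overwrite), short-circuiting instead of always traversing everything.
import Mathlib
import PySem

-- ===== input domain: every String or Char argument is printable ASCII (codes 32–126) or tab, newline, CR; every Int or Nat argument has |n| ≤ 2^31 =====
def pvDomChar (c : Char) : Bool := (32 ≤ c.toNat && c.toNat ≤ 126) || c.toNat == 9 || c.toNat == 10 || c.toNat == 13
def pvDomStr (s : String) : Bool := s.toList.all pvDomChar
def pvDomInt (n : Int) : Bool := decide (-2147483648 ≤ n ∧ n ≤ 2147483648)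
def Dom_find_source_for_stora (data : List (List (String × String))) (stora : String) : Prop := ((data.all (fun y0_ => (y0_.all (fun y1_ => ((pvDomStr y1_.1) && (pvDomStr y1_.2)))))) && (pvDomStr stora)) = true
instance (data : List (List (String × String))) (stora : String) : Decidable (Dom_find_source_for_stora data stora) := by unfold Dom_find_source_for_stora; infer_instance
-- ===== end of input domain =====

-- B iterates the dicts in reverse and returns on the first dict containing the key,
-- instead of A's forward scan over every pair with last-overwrite accumulation.
-- Equal because dict keys are unique (Pre_), so the first hit from the end is A's last overwrite.

-- ===== PORT A =====
-- stora = stora.split(':')[1], IndexError swallowed (stora left unchanged)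
def pvSplitStora (stora : String) : String :=
  match (PySem.Str.split? stora ":").bind (fun parts => PySem.List.pyGet? parts 1) with
  | some s => s
  | none => stora

def find_source_for_stora (data : List (List (String × String))) (stora : String) : Option String :=
  let stora := pvSplitStora stora
  data.foldl (fun result item =>
    item.foldl (fun result kv => if kv.1 == stora then some kv.2 else result) result) none

-- ===== PORT B =====
-- 'for item in reversed(list(data)): if stora in item: return item[stora]'; dict lookup = first match
def pvAltLoop (stora : String) : List (List (String × String)) → Option String
  | [] => none
  | item :: rest =>
    match item.find? (fun kv => kv.1 == stora) with
    | some kv => some kv.2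
    | none => pvAltLoop stora rest

def find_source_for_stora_alt (data : List (List (String × String))) (stora : String) : Option String :=
  let stora := pvSplitStora stora
  pvAltLoop stora data.reverse

-- ===== PRECONDITION & SPEC =====
-- Pre_ restricts each inner association list to distinct keys, i.e. to lists that actually
-- represent a Python dict (a Python dict cannot hold duplicate keys, so nothing A accepts is excluded).
def Pre_find_source_for_stora (data : List (List (String × String))) (_stora : String) : Prop :=
  ∀ item ∈ data, (item.map Prod.fst).Nodup
instance (data : List (List (String × String))) (stora : String) : Decidable (Pre_find_source_for_stora data stora) := by unfold Pre_find_source_for_stora; infer_instance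

def pvWitness_find_source_for_stora : (List (List (String × String))) × String :=
  ([[("a", "x")], [("a", "y"), ("b", "z")]], "a")

def Spec_find_source_for_stora (data : List (List (String × String))) (stora : String) (out : Option String) : Prop := out = find_source_for_stora_alt data stora
instance (data : List (List (String × String))) (stora : String) (out : Option String) : Decidable (Spec_find_source_for_stora data stora out) := by unfold Spec_find_source_for_stora; infer_instance

-- ===== CLAIM (what is proved, stated in full; the proofs are below) =====
def Claim_equal_find_source_for_stora : Prop := ∀ (data : List (List (String × String))) (stora : String), Dom_find_source_for_stora data stora → Pre_find_source_for_stora data stora → Spec_find_source_for_stora data stora (find_source_for_stora data stora)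

-- ===== LEMMAS AND PROOFS =====

-- A's inner loop keeps the LAST matching value, i.e. the first match of the reversed list.
theorem pv_inner_foldl (s : String) (l : List (String × String)) (r : Option String) :
    l.foldl (fun result kv => if kv.1 == s then some kv.2 else result) r
    = match l.reverse.find? (fun kv => kv.1 == s) with
      | some kv => some kv.2
      | none => r := by
  induction l generalizing r with
  | nil => simp
  | cons kv t ih =>
    simp only [List.foldl_cons, ih, List.reverse_cons, List.find?_append]
    have hb : (kv.1 == s) = decide (kv.1 = s) := rfl
    by_cases hk : kv.1 = s
    · cases hfind : t.reverse.find? (fun kv => kv.1 == s) <;>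
        simp [List.find?, hfind, hb, hk]
    · cases hfind : t.reverse.find? (fun kv => kv.1 == s) <;>
        simp [List.find?, hb, hk]

-- with distinct keys, the first match of the reversed list is the first match of the list
theorem pv_find?_reverse (s : String) (l : List (String × String))
    (h : (l.map Prod.fst).Nodup) :
    l.reverse.find? (fun kv => kv.1 == s) = l.find? (fun kv => kv.1 == s) := by
  induction l with
  | nil => simp
  | cons kv t ih =>
    simp only [List.map_cons, List.nodup_cons] at h
    simp only [List.reverse_cons, List.find?_append, ih h.2]
    by_cases hk : kv.1 == s
    · have : t.find? (fun kv => kv.1 == s) = none := by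
        rw [List.find?_eq_none]
        intro x hx hpx
        exact h.1 (by
          have : x.1 = kv.1 := by
            have := (beq_iff_eq).mp hpx
            have := (beq_iff_eq).mp hk
            simp_all
          exact this ▸ List.mem_map_of_mem hx)
      simp [this, List.find?, hk]
    · simp [List.find?, hk]
  
-- A's outer loop (with a first-match inner result) equals B's reverse early-return scan
theorem pv_outer (s : String) (data : List (List (String × String))) (r : Option String) :
    data.foldl (fun result item =>
        match item.find? (fun kv => kv.1 == s) with
        | some kv => some kv.2
        | none => result) r
    = match pvAltLoop s data.reverse with
      | some v => some v
      | none => r := by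
  induction data generalizing r with
  | nil => simp [pvAltLoop]
  | cons item t ih =>
    have happ : ∀ (xs : List (List (String × String))),
        pvAltLoop s (xs ++ [item])
        = match pvAltLoop s xs with
          | some v => some v
          | none => pvAltLoop s [item] := by
      intro xs
      induction xs with
      | nil => simp [pvAltLoop]
      | cons y ys ihy =>
        simp only [List.cons_append, pvAltLoop]
        cases hy : y.find? (fun kv => kv.1 == s) <;> simp [pvAltLoop, ihy]
    simp only [List.foldl_cons, ih, List.reverse_cons, happ]
    cases pvAltLoop s t.reverse <;> cases hfi : item.find? (fun kv => kv.1 == s) <;>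
      simp [pvAltLoop, hfi]

-- ===== VERDICT (by name: the statement is the Claim_ definition above) =====
theorem pv_main (s : String) (data : List (List (String × String)))
    (hpre : ∀ item ∈ data, (item.map Prod.fst).Nodup) :
    data.foldl (fun result item =>
      item.foldl (fun result kv => if kv.1 == s then some kv.2 else result) result) none
    = pvAltLoop s data.reverse := by
  have hcongr := PySem.List.foldl_congr_mem' (l := data) (init := (none : Option String))
      (f := fun result item =>
        item.foldl (fun result kv => if kv.1 == s then some kv.2 else result) result)
      (g := fun result item =>
        match item.find? (fun kv => kv.1 == s) with
        | some kv => some kv.2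
        | none => result)
      (fun item hmem r =>
        (pv_inner_foldl s item r).trans
          (by rw [pv_find?_reverse s item (hpre item hmem)]))
  rw [hcongr, pv_outer s data none]
  cases pvAltLoop s data.reverse <;> rfl

theorem find_source_for_stora_spec : Claim_equal_find_source_for_stora := by
  intro data stora _ hpre
  exact pv_main (pvSplitStora stora) data hpre
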